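-- pv_equiv track=rewrite | github.com/FerranAgulloLopez/ihlt-sts | auxiliary_code/sentence_similarity_metrics.py | _idf_process_sentence
-- ===== SOURCE A (Python) =====
-- def _idf_process_sentence(sentence_id, sentence, corpus_word_apparitions, sentence_word_apparitions):
--     """
--     Computes document frequency for each word and term frequency for each word-sentence.
--     """
--     sentence_word_apparitions[sentence_id] = {}
--     for word in sentence[2]:
--         if word not in corpus_word_apparitions:
--             corpus_word_apparitions[word] = 1
--             sentence_word_apparitions[sentence_id][word] = 1
--         elif word not in sentence_word_apparitions[sentence_id]:
--             corpus_word_apparitions[word] += 1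
--             sentence_word_apparitions[sentence_id][word] = 1
--         elif word in sentence_word_apparitions[sentence_id]:
--             sentence_word_apparitions[sentence_id][word] += 1
--     return corpus_word_apparitions, sentence_word_apparitions
-- ===== SOURCE B (Python) =====
-- def _idf_process_sentence(sentence_id, sentence, corpus_word_apparitions, sentence_word_apparitions):
--     """
--     Computes document frequency for each word and term frequency for each word-sentence.
--     Two-pass version: first build this sentence's term-frequency dict, then bump the
--     document frequency once per distinct word.
--     """
--     tf = {}
--     for word in sentence[2]:
--         tf[word] = tf.get(word, 0) + 1
--     sentence_word_apparitions[sentence_id] = tf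
--     for word in tf:
--         corpus_word_apparitions[word] = corpus_word_apparitions.get(word, 0) + 1
--     return corpus_word_apparitions, sentence_word_apparitions
-- ===== Notes on version B (the rewrite author's own statement) =====
-- stated objective: simpler
-- what changed: A's single interleaved pass with three membership branches is replaced by two separate passes: one pass building the sentence's term-frequency dict, then one document-frequency bump per distinct word of that dict.
import Mathlib
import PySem

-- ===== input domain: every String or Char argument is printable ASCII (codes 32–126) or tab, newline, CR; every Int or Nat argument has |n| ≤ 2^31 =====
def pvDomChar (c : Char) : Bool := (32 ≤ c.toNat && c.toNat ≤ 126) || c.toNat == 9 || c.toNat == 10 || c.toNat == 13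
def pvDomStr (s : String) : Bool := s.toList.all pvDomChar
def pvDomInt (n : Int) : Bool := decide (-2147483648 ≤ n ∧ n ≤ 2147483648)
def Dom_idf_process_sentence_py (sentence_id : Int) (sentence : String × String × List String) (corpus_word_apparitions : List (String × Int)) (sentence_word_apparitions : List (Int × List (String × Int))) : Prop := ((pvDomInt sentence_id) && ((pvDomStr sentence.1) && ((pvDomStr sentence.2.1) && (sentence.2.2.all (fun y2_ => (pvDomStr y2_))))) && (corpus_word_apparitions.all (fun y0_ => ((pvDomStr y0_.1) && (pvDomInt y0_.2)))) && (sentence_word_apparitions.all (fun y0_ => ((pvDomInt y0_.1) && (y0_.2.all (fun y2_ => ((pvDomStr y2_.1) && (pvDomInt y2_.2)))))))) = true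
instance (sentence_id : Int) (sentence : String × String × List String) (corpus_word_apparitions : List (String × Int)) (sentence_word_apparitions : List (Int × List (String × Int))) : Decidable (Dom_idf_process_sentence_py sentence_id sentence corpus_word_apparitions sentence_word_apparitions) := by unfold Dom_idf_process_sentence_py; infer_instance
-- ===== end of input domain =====

-- B replaces A's single interleaved branch-heavy pass by two passes (term-frequency dict first,
-- then one document-frequency bump per distinct word); objective: simpler. Both Pythons mutate
-- the two dict arguments in place identically; the theorem is about the RETURN value.

-- ===== PORT A =====
-- Literal transliteration of A. Python reads sentence_word_apparitions[sentence_id] (would be a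
-- KeyError if absent); the key is always present — set before the loop — so reading it with
-- getD/modify default Dict.empty is exact. The final `elif word in …` condition is the negation
-- of the failed second condition, hence always true there; it is the `else` branch.
def idf_process_sentence_py (sentence_id : Int) (sentence : String × String × List String)
    (corpus_word_apparitions : List (String × Int))
    (sentence_word_apparitions : List (Int × List (String × Int))) :
    (List (String × Int)) × (List (Int × List (String × Int))) :=
  let cwa0 : PySem.Dict String Int := PySem.Dict.mk corpus_word_apparitions
  let swa0 : PySem.Dict Int (PySem.Dict String Int) :=
    PySem.Dict.mk (sentence_word_apparitions.map (fun p => (p.1, PySem.Dict.mk p.2)))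
  let swa1 := swa0.insert sentence_id PySem.Dict.empty
  let st := sentence.2.2.foldl
    (fun (st : PySem.Dict String Int × PySem.Dict Int (PySem.Dict String Int)) word =>
      if st.1.contains word = false then
        (st.1.insert word 1,
         st.2.modify sentence_id PySem.Dict.empty (fun inner => inner.insert word 1))
      else if ((st.2.getD sentence_id PySem.Dict.empty).contains word) = false then
        (st.1.modify word 0 (· + 1),
         st.2.modify sentence_id PySem.Dict.empty (fun inner => inner.insert word 1))
      else
        (st.1,
         st.2.modify sentence_id PySem.Dict.empty (fun inner => inner.modify word 0 (· + 1))))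
    (cwa0, swa1)
  (st.1.items, st.2.items.map (fun p => (p.1, p.2.items)))

-- ===== PORT B =====
def idf_process_sentence_py_alt (sentence_id : Int) (sentence : String × String × List String)
    (corpus_word_apparitions : List (String × Int))
    (sentence_word_apparitions : List (Int × List (String × Int))) :
    (List (String × Int)) × (List (Int × List (String × Int))) :=
  let tf : PySem.Dict String Int :=
    sentence.2.2.foldl (fun d w => d.insert w (d.getD w 0 + 1)) PySem.Dict.empty
  let swa : PySem.Dict Int (PySem.Dict String Int) :=
    (PySem.Dict.mk (sentence_word_apparitions.map (fun p => (p.1, PySem.Dict.mk p.2)))).insert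
      sentence_id tf
  let cwa : PySem.Dict String Int :=
    tf.keys.foldl (fun c w => c.insert w (c.getD w 0 + 1)) (PySem.Dict.mk corpus_word_apparitions)
  (cwa.items, swa.items.map (fun p => (p.1, p.2.items)))

-- ===== PRECONDITION & SPEC =====
def Spec_idf_process_sentence_py (sentence_id : Int) (sentence : String × String × List String) (corpus_word_apparitions : List (String × Int)) (sentence_word_apparitions : List (Int × List (String × Int))) (out : (List (String × Int)) × (List (Int × List (String × Int)))) : Prop := out = idf_process_sentence_py_alt sentence_id sentence corpus_word_apparitions sentence_word_apparitions
instance (sentence_id : Int) (sentence : String × String × List String) (corpus_word_apparitions : List (String × Int)) (sentence_word_apparitions : List (Int × List (String × Int))) (out : (List (String × Int)) × (List (Int × List (String × Int)))) : Decidable (Spec_idf_process_sentence_py sentence_id sentence corpus_word_apparitions sentence_word_apparitions out) := by unfold Spec_idf_process_sentence_py; infer_instance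

-- ===== CLAIM (what is proved, stated in full; the proofs are below) =====
def Claim_equal_idf_process_sentence_py : Prop := ∀ (sentence_id : Int) (sentence : String × String × List String) (corpus_word_apparitions : List (String × Int)) (sentence_word_apparitions : List (Int × List (String × Int))), Dom_idf_process_sentence_py sentence_id sentence corpus_word_apparitions sentence_word_apparitions → Spec_idf_process_sentence_py sentence_id sentence corpus_word_apparitions sentence_word_apparitions (idf_process_sentence_py sentence_id sentence corpus_word_apparitions sentence_word_apparitions)

-- ===== LEMMAS AND PROOFS =====

-- contains after B's document-frequency fold: a key is present iff it was present before or occurs in ks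
lemma contains_dfFold (ks : List String) (c : PySem.Dict String Int) (w : String) :
    (ks.foldl (fun c w => c.insert w (c.getD w 0 + 1)) c).contains w
      = (c.contains w || decide (w ∈ ks)) := by
  induction ks generalizing c with
  | nil => simp
  | cons k ks ih =>
    by_cases h : w = k
    · subst h
      simp [List.foldl_cons, ih]
    · have hb : (w == k) = false := by simpa using h
      simp [List.foldl_cons, ih, PySem.Dict.contains_insert, hb, h]

-- B's document-frequency fold does not touch keys outside ks
lemma get?_dfFold_of_not_mem (ks : List String) (c : PySem.Dict String Int) (w : String)
    (h : w ∉ ks) :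
    (ks.foldl (fun c w => c.insert w (c.getD w 0 + 1)) c).get? w = c.get? w := by
  induction ks generalizing c with
  | nil => rfl
  | cons k ks ih =>
    simp only [List.mem_cons, not_or] at h
    rw [List.foldl_cons, ih _ h.2, PySem.Dict.get?_insert_of_ne _ _ h.1]

-- one step of A's loop, re-expressed in B's terms
lemma stepA_eq (sid : Int) (w : String) (t c0 : PySem.Dict String Int)
    (s0 : PySem.Dict Int (PySem.Dict String Int)) :
    (if (t.keys.foldl (fun c w => c.insert w (c.getD w 0 + 1)) c0).contains w = false then
        ((t.keys.foldl (fun c w => c.insert w (c.getD w 0 + 1)) c0).insert w 1,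
         (s0.insert sid t).modify sid PySem.Dict.empty (fun inner => inner.insert w 1))
      else if (((s0.insert sid t).getD sid PySem.Dict.empty).contains w) = false then
        ((t.keys.foldl (fun c w => c.insert w (c.getD w 0 + 1)) c0).modify w 0 (· + 1),
         (s0.insert sid t).modify sid PySem.Dict.empty (fun inner => inner.insert w 1))
      else
        ((t.keys.foldl (fun c w => c.insert w (c.getD w 0 + 1)) c0),
         (s0.insert sid t).modify sid PySem.Dict.empty (fun inner => inner.modify w 0 (· + 1))))
    = ((t.insert w (t.getD w 0 + 1)).keys.foldl (fun c w => c.insert w (c.getD w 0 + 1)) c0,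
       s0.insert sid (t.insert w (t.getD w 0 + 1))) := by
  simp only [PySem.Dict.getD_insert_self]
  by_cases ht : t.contains w = true
  · -- w already counted in this sentence: A takes the third branch
    have hmem : w ∈ t.keys := (PySem.Dict.contains_iff_mem_keys t w).mp ht
    have hc : (t.keys.foldl (fun c w => c.insert w (c.getD w 0 + 1)) c0).contains w = true := by
      simp [contains_dfFold, hmem]
    simp [hc, ht, PySem.Dict.modify, PySem.Dict.getD_insert_self,
      PySem.Dict.insert_insert_self, PySem.Dict.keys_insert_of_contains t _ ht]
  · -- first occurrence of w in this sentence
    have ht' : t.contains w = false := by simpa using ht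
    have hkeys : ∀ v : Int, (t.insert w v).keys = t.keys ++ [w] := fun v =>
      PySem.Dict.keys_insert_of_not_contains t v ht'
    have htD : t.getD w 0 = 0 := PySem.Dict.getD_of_not_contains t 0 ht'
    have hnm : w ∉ t.keys := fun hm => by
      simp [(PySem.Dict.contains_iff_mem_keys t w).mpr hm] at ht'
    by_cases hcb : (t.keys.foldl (fun c w => c.insert w (c.getD w 0 + 1)) c0).contains w = true
    · -- already in corpus: A's second branch; modify is insert of getD + 1
      simp [hcb, ht', htD, hkeys, List.foldl_append, PySem.Dict.modify,
        PySem.Dict.getD_insert_self, PySem.Dict.insert_insert_self]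
    · -- brand-new word: A's first branch; its corpus getD is 0
      have hc' : (t.keys.foldl (fun c w => c.insert w (c.getD w 0 + 1)) c0).contains w = false := by
        simpa using hcb
      have hc0 : c0.contains w = false := by
        have h2 := contains_dfFold t.keys c0 w
        rw [hc'] at h2
        simpa using (Bool.or_eq_false_iff.mp h2.symm).1
      have hg : (t.keys.foldl (fun c w => c.insert w (c.getD w 0 + 1)) c0).getD w 0 = 0 := by
        rw [PySem.Dict.getD_eq_get?_getD, get?_dfFold_of_not_mem _ _ _ hnm,
          ← PySem.Dict.getD_eq_get?_getD]
        exact PySem.Dict.getD_of_not_contains c0 0 hc0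
      simp [hc', htD, hkeys, List.foldl_append, PySem.Dict.modify,
        PySem.Dict.getD_insert_self, PySem.Dict.insert_insert_self, hg]

-- A's whole loop equals B's two folds, for any already-accumulated term-frequency dict t
lemma loopA_eq (sid : Int) (ws : List String) (t c0 : PySem.Dict String Int)
    (s0 : PySem.Dict Int (PySem.Dict String Int)) :
    ws.foldl
      (fun (st : PySem.Dict String Int × PySem.Dict Int (PySem.Dict String Int)) word =>
        if st.1.contains word = false then
          (st.1.insert word 1,
           st.2.modify sid PySem.Dict.empty (fun inner => inner.insert word 1))
        else if ((st.2.getD sid PySem.Dict.empty).contains word) = false then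
          (st.1.modify word 0 (· + 1),
           st.2.modify sid PySem.Dict.empty (fun inner => inner.insert word 1))
        else
          (st.1,
           st.2.modify sid PySem.Dict.empty (fun inner => inner.modify word 0 (· + 1))))
      (t.keys.foldl (fun c w => c.insert w (c.getD w 0 + 1)) c0, s0.insert sid t)
    = ((ws.foldl (fun d w => d.insert w (d.getD w 0 + 1)) t).keys.foldl
         (fun c w => c.insert w (c.getD w 0 + 1)) c0,
       s0.insert sid (ws.foldl (fun d w => d.insert w (d.getD w 0 + 1)) t)) := by
  induction ws generalizing t with
  | nil => rfl
  | cons w ws ih =>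
    simp only [List.foldl_cons]
    rw [stepA_eq sid w t c0 s0, ih (t.insert w (t.getD w 0 + 1))]

-- ===== VERDICT (by name: the statement is the Claim_ definition above) =====
theorem idf_process_sentence_py_spec : Claim_equal_idf_process_sentence_py := by
  intro sid sentence cwa swa _
  unfold Spec_idf_process_sentence_py idf_process_sentence_py idf_process_sentence_py_alt
  have h := loopA_eq sid sentence.2.2 PySem.Dict.empty (PySem.Dict.mk cwa)
    (PySem.Dict.mk (swa.map (fun p => (p.1, PySem.Dict.mk p.2))))
  simp only [PySem.Dict.keys_empty, List.foldl_nil] at h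
  simp only [h]
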